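-- pv_equiv track=rewrite | github.com/MrBrantCode/unitest_baseline | mut_generate/mist_train_taco/taco_5569/solution.py | minimize_tower_instability
-- ===== SOURCE A (Python) =====
-- def minimize_tower_instability(n, k, heights):
--     # Create a list of towers with their initial heights and indices
--     towers = [[heights[i], i + 1] for i in range(n)]
--     towers.sort()
--
--     operations = []
--     k1 = k
--
--     # If all towers are already of the same height, no operations are needed
--     if len(set(heights)) == 1:
--         return 0, 0, []
--
--     # Perform operations to minimize instability
--     while k > 0:
--         k -= 1
--         # Move a cube from the tallest tower to the shortest tower
--         towers[0][0] += 1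
--         towers[-1][0] -= 1
--         operations.append((towers[-1][1], towers[0][1]))
--         towers.sort()
--
--         # Check if all towers are of the same height
--         if len(set((towers[i][0] for i in range(n)))) == 1:
--             break
--
--     # Calculate the final heights of the towers
--     final_heights = [towers[i][0] for i in range(n)]
--
--     # Calculate the minimum instability
--     min_instability = max(final_heights) - min(final_heights)
--
--     return min_instability, len(operations), operations
-- ===== SOURCE B (Python) =====
-- # B: instead of re-sorting the whole list after every move, keep the towers
-- # list sorted: pop the current min and max off the ends and re-insert the two
-- # adjusted towers in order; the all-equal test is a single ends comparison.
-- def _insort(towers, item):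
--     # insert item into the sorted list 'towers' keeping it sorted
--     i = 0
--     while i < len(towers) and towers[i] <= item:
--         i += 1
--     towers.insert(i, item)
--
-- def minimize_tower_instability(n, k, heights):
--     if len(set(heights)) == 1:
--         return 0, 0, []
--     towers = sorted((heights[i], i + 1) for i in range(n))
--     operations = []
--     while k > 0 and towers[0][0] != towers[-1][0]:
--         k -= 1
--         lo = towers.pop(0)
--         hi = towers.pop()
--         _insort(towers, (hi[0] - 1, hi[1]))
--         _insort(towers, (lo[0] + 1, lo[1]))
--         operations.append((hi[1], lo[1]))
--     return towers[-1][0] - towers[0][0], len(operations), operations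
-- ===== Notes on version B (the rewrite author's own statement) =====
-- stated objective: alternative
-- what changed: B keeps the towers list sorted across the whole simulation: each operation pops the min and max off the two ends and re-inserts the two adjusted towers with an ordered insert, and the all-towers-equal test becomes a single comparison of the two ends, instead of A's full list re-sort plus building a set of all n heights on every operation.
-- intended difference: When the first n heights are already all equal but the whole heights list is not constant (in particular whenever n = 1 with k >= 1), A still performs pointless cube moves and returns a positive operation count, e.g. one self-move of tower 1 for a single tower, while B returns instability 0 with an empty operation list because the towers are already level, which is the intended answer. — e.g. on minimize_tower_instability(1, 1, [5, 6]): A returns (0, 1, [(1, 1)]), B returns (0, 0, [])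
import Mathlib
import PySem

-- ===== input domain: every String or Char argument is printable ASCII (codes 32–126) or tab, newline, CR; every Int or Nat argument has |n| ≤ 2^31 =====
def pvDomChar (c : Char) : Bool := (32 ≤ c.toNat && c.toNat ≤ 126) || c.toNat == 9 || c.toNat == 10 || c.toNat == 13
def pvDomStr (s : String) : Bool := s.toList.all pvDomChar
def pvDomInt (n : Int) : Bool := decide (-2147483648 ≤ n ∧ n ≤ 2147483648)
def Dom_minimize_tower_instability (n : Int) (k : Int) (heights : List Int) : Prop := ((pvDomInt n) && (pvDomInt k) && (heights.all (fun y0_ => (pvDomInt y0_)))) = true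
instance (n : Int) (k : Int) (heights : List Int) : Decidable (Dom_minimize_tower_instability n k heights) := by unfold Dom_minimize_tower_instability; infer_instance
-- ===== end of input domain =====

-- B keeps the towers list sorted across operations (pop the two ends, ordered-insert the two
-- adjusted towers) instead of re-sorting the whole list after every move; the all-equal test
-- becomes a comparison of the two ends.  A mutates its local 'towers' list only; neither
-- version mutates the caller's arguments.

-- ===== PORT A =====
-- the check 'len(set(towers[i][0] for i in range(n))) == 1'
def mtiAllEq (n : Int) (towers : List (Int × Int)) : Bool :=
  (PySem.Set.ofList ((PySem.List.pyRange 0 n 1).map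
      (fun i => (PySem.List.pyGetD towers i ((0 : Int), (0 : Int))).1))).length == 1

-- the 'while k > 0' loop of A; fuel = k.toNat (the loop decrements k once per pass).
-- pyGetD/pySetD defaults are only read where Python would raise IndexError (towers == [],
-- excluded by Pre_).
def mtiLoop (n : Int) : Nat → List (Int × Int) → List (Int × Int) →
    List (Int × Int) × List (Int × Int)
  | 0, towers, ops => (towers, ops)
  | fuel + 1, towers, ops =>
    if towers = [] then (towers, ops)  -- Python raises IndexError here; outside Pre_
    else
      -- towers[0][0] += 1
      let t0 := PySem.List.pyGetD towers 0 ((0 : Int), (0 : Int))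
      let towers1 := PySem.List.pySetD towers 0 (t0.1 + 1, t0.2)
      -- towers[-1][0] -= 1
      let tl := PySem.List.pyGetD towers1 (-1) ((0 : Int), (0 : Int))
      let towers2 := PySem.List.pySetD towers1 (-1) (tl.1 - 1, tl.2)
      -- operations.append((towers[-1][1], towers[0][1]))
      let ops' := ops ++ [((PySem.List.pyGetD towers2 (-1) ((0 : Int), (0 : Int))).2,
                          (PySem.List.pyGetD towers2 0 ((0 : Int), (0 : Int))).2)]
      -- towers.sort()
      let towers' := PySem.List.sorted towers2 (fun p => toLex p)
      if mtiAllEq n towers' then (towers', ops') else mtiLoop n fuel towers' ops'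

def minimize_tower_instability (n : Int) (k : Int) (heights : List Int) :
    Int × Int × (List (Int × Int)) :=
  -- towers = [[heights[i], i + 1] for i in range(n)]; towers.sort()
  let towers := PySem.List.sorted
      ((PySem.List.pyRange 0 n 1).map (fun i => (PySem.List.pyGetD heights i 0, i + 1)))
      (fun p => toLex p)
  if (PySem.Set.ofList heights).length = 1 then (0, 0, [])
  else
    let r := mtiLoop n k.toNat towers []
    -- final_heights = [towers[i][0] for i in range(n)]
    let fhs := (PySem.List.pyRange 0 n 1).map
        (fun i => (PySem.List.pyGetD r.1 i ((0 : Int), (0 : Int))).1)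
    -- max(final_heights) - min(final_heights): max/min raise on [], outside Pre_
    (((PySem.List.max? fhs (fun x => x)).getD 0) - ((PySem.List.min? fhs (fun x => x)).getD 0),
     PySem.List.len r.2, r.2)

-- ===== PORT B =====
-- _insort: linear scan 'while i < len(towers) and towers[i] <= item', then insert at i
def pvInsort (x : Int × Int) : List (Int × Int) → List (Int × Int)
  | [] => [x]
  | y :: ys => if toLex y ≤ toLex x then y :: pvInsort x ys else x :: y :: ys

-- the 'while k > 0 and towers[0][0] != towers[-1][0]' loop of Source B; fuel = k.toNat
def mtiAltLoop : Nat → List (Int × Int) → List (Int × Int) →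
    List (Int × Int) × List (Int × Int)
  | 0, ts, ops => (ts, ops)
  | fuel + 1, ts, ops =>
    match ts with
    | [] => ([], ops)  -- Source B raises IndexError here; outside Pre_
    | t :: rest =>
      let hi := (t :: rest).getLast (by simp)
      if t.1 = hi.1 then (t :: rest, ops)
      else
        -- lo = towers.pop(0); hi = towers.pop(); _insort hi'; _insort lo'
        let ts' := pvInsort (t.1 + 1, t.2) (pvInsort (hi.1 - 1, hi.2) rest.dropLast)
        mtiAltLoop fuel ts' (ops ++ [(hi.2, t.2)])

def minimize_tower_instability_alt (n : Int) (k : Int) (heights : List Int) :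
    Int × Int × (List (Int × Int)) :=
  if (PySem.Set.ofList heights).length = 1 then (0, 0, [])
  else
    let towers := PySem.List.sorted
        ((PySem.List.pyRange 0 n 1).map (fun i => (PySem.List.pyGetD heights i 0, i + 1)))
        (fun p => toLex p)
    let r := mtiAltLoop k.toNat towers []
    match r.1 with
    | [] => (0, 0, r.2)  -- Source B raises IndexError (towers[-1]); outside Pre_
    | t :: rest => (((t :: rest).getLast (by simp)).1 - t.1, PySem.List.len r.2, r.2)

-- ===== PRECONDITION & SPEC =====
-- Pre_ excludes exactly the inputs where A raises: n > len(heights) (IndexError in the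
-- comprehension), and n ≤ 0 with heights not a non-empty constant list (IndexError on
-- towers[0] when k > 0, ValueError from max([]) otherwise).
def Pre_minimize_tower_instability (n : Int) (k : Int) (heights : List Int) : Prop :=
  n ≤ (heights.length : Int) ∧
    (1 ≤ n ∨ (heights ≠ [] ∧ ∀ h ∈ heights, h = heights.getD 0 0))
instance (n : Int) (k : Int) (heights : List Int) :
    Decidable (Pre_minimize_tower_instability n k heights) := by
  unfold Pre_minimize_tower_instability; infer_instance

def pvWitness_minimize_tower_instability : Int × Int × List Int := (3, 2, [4, 1, 7])

-- When the first n heights are already all equal but the whole heights list is not constant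
-- (in particular whenever n = 1) and k ≥ 1, A still performs pointless moves and returns a
-- positive operation count — e.g. one self-move of tower 1 when n = 1 — while B returns
-- instability 0 with an empty operation list: the towers are already level, so doing no
-- operation is the intended answer.
def D_minimize_tower_instability (n : Int) (k : Int) (heights : List Int) : Prop :=
  1 ≤ n ∧ 1 ≤ k ∧ (∀ h ∈ heights.take n.toNat, h = heights.getD 0 0) ∧
    ¬(∀ h ∈ heights, h = heights.getD 0 0)
instance (n : Int) (k : Int) (heights : List Int) :
    Decidable (D_minimize_tower_instability n k heights) := by
  unfold D_minimize_tower_instability; infer_instance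

def Spec_minimize_tower_instability (n : Int) (k : Int) (heights : List Int)
    (out : Int × Int × (List (Int × Int))) : Prop :=
  ¬ D_minimize_tower_instability n k heights → out = minimize_tower_instability_alt n k heights
instance (n : Int) (k : Int) (heights : List Int) (out : Int × Int × (List (Int × Int))) :
    Decidable (Spec_minimize_tower_instability n k heights out) := by
  unfold Spec_minimize_tower_instability; infer_instance

def pvDiffWitness_minimize_tower_instability : Int × Int × List Int := (1, 1, [5, 6])
def pvDiffWitnessOut_minimize_tower_instability :
    (Int × Int × (List (Int × Int))) × (Int × Int × (List (Int × Int))) :=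
  ((0, 1, [(1, 1)]), (0, 0, []))

-- ===== CLAIM (what is proved, stated in full; the proofs are below) =====
def Claim_unchanged_minimize_tower_instability : Prop := ∀ (n : Int) (k : Int) (heights : List Int), Dom_minimize_tower_instability n k heights → Pre_minimize_tower_instability n k heights → Spec_minimize_tower_instability n k heights (minimize_tower_instability n k heights)
def Claim_changed_minimize_tower_instability : Prop := Dom_minimize_tower_instability (pvDiffWitness_minimize_tower_instability.1) (pvDiffWitness_minimize_tower_instability.2.1) (pvDiffWitness_minimize_tower_instability.2.2) ∧ Pre_minimize_tower_instability (pvDiffWitness_minimize_tower_instability.1) (pvDiffWitness_minimize_tower_instability.2.1) (pvDiffWitness_minimize_tower_instability.2.2) ∧ D_minimize_tower_instability (pvDiffWitness_minimize_tower_instability.1) (pvDiffWitness_minimize_tower_instability.2.1) (pvDiffWitness_minimize_tower_instability.2.2) ∧ minimize_tower_instability (pvDiffWitness_minimize_tower_instability.1) (pvDiffWitness_minimize_tower_instability.2.1) (pvDiffWitness_minimize_tower_instability.2.2) = pvDiffWitnessOut_minimize_tower_instability.1 ∧ minimize_tower_instability_alt (pvDiffWitness_minimize_tower_instability.1) (pvDiffWitness_minimize_tower_instability.2.1)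 (pvDiffWitness_minimize_tower_instability.2.2) = pvDiffWitnessOut_minimize_tower_instability.2 ∧ pvDiffWitnessOut_minimize_tower_instability.1 ≠ pvDiffWitnessOut_minimize_tower_instability.2
def Claim_exact_minimize_tower_instability : Prop := ∀ (n : Int) (k : Int) (heights : List Int), Dom_minimize_tower_instability n k heights → Pre_minimize_tower_instability n k heights → D_minimize_tower_instability n k heights → minimize_tower_instability n k heights ≠ minimize_tower_instability_alt n k heights

-- ===== LEMMAS AND PROOFS =====

theorem pvLex_antisymm (a b : Int × Int) (h1 : toLex a ≤ toLex b) (h2 : toLex b ≤ toLex a) :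
    a = b := by
  have := le_antisymm h1 h2
  exact congrArg ofLex this

theorem pvInsort_perm (x : Int × Int) (l : List (Int × Int)) :
    (pvInsort x l).Perm (x :: l) := by
  induction l with
  | nil => simp [pvInsort]
  | cons y ys ih =>
    simp only [pvInsort]
    split
    · exact ((ih.cons y).trans (List.Perm.swap x y ys))
    · exact List.Perm.refl _

theorem pvInsort_pairwise (x : Int × Int) (l : List (Int × Int))
    (h : l.Pairwise (fun a b => toLex a ≤ toLex b)) :
    (pvInsort x l).Pairwise (fun a b => toLex a ≤ toLex b) := by
  induction l with
  | nil => simp [pvInsort]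
  | cons y ys ih =>
    rcases List.pairwise_cons.1 h with ⟨hy, hys⟩
    simp only [pvInsort]
    split
    · rename_i hle
      refine List.pairwise_cons.2 ⟨?_, ih hys⟩
      intro z hz
      have := (pvInsort_perm x ys).mem_iff.1 hz
      rcases (by simpa using this) with rfl | hz'
      · exact hle
      · exact hy z hz'
    · rename_i hnle
      have hxy : toLex x ≤ toLex y := le_of_not_ge hnle
      refine List.pairwise_cons.2 ⟨?_, h⟩
      intro z hz
      rcases (by simpa using hz) with rfl | hz'
      · exact hxy
      · exact le_trans hxy (hy z hz')

theorem pvSortedUnique (l1 l2 : List (Int × Int)) (hp : l1.Perm l2)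
    (h1 : l1.Pairwise (fun a b => toLex a ≤ toLex b))
    (h2 : l2.Pairwise (fun a b => toLex a ≤ toLex b)) : l1 = l2 :=
  List.Perm.eq_of_pairwise (fun a b _ _ hab hba => pvLex_antisymm a b hab hba) h1 h2 hp


-- every element of a lex-sorted list has first component between the ends
theorem pvHead_le (t : Int × Int) (rest : List (Int × Int))
    (h : (t :: rest).Pairwise (fun a b => toLex a ≤ toLex b)) :
    ∀ e ∈ t :: rest, t.1 ≤ e.1 := by
  intro e he
  rcases (by simpa using he) with rfl | he'
  · exact le_refl _
  · have := (List.pairwise_cons.1 h).1 e he'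
    rcases Prod.Lex.le_iff.1 this with h1 | ⟨h1, _⟩
    · exact le_of_lt h1
    · exact le_of_eq h1

theorem pvLe_last : ∀ (l : List (Int × Int)) (hl : l ≠ [])
    (_ : l.Pairwise (fun a b => toLex a ≤ toLex b)),
    ∀ e ∈ l, e.1 ≤ (l.getLast hl).1
  | [], hl, _, _, _ => absurd rfl hl
  | [t], _, _, e, he => by
      rcases (by simpa using he) with rfl; simp
  | t :: u :: us, _, h, e, he => by
      have htail := (List.pairwise_cons.1 h).2
      rw [List.getLast_cons (by simp : u :: us ≠ [])]
      rcases (by simpa using he) with rfl | he'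
      · have hu : (u :: us).getLast (by simp) ∈ u :: us := List.getLast_mem _
        have := (List.pairwise_cons.1 h).1 _ hu
        rcases Prod.Lex.le_iff.1 this with h1 | ⟨h1, _⟩
        · exact le_of_lt h1
        · exact le_of_eq h1
      · exact pvLe_last (u :: us) (by simp) htail e (by simpa using he')

-- len(set(xs)) == 1 says exactly: the (non-empty) list is constant
theorem pvSetLenOne (xs : List Int) (hne : xs ≠ []) :
    (PySem.Set.ofList xs).length = 1 ↔ ∀ a ∈ xs, ∀ b ∈ xs, a = b := by
  constructor
  · intro h a ha b hb
    rcases (by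
      cases hs : PySem.Set.ofList xs with
      | nil => rw [hs] at h; simp at h
      | cons c l =>
        rw [hs] at h
        simp at h
        exact ⟨c, by rw [h]⟩ : ∃ c, PySem.Set.ofList xs = [c]) with ⟨c, hc⟩
    have ha' : a ∈ PySem.Set.ofList xs := (PySem.Set.mem_ofList xs a).2 ha
    have hb' : b ∈ PySem.Set.ofList xs := (PySem.Set.mem_ofList xs b).2 hb
    rw [hc] at ha' hb'
    simp at ha' hb'; omega
  · intro h
    rcases List.exists_mem_of_ne_nil xs hne with ⟨c, hc⟩
    have hmemc : c ∈ PySem.Set.ofList xs := (PySem.Set.mem_ofList xs c).2 hc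
    have hnd := PySem.Set.nodup_ofList xs
    cases hs : PySem.Set.ofList xs with
    | nil => rw [hs] at hmemc; simp at hmemc
    | cons d l =>
      cases l with
      | nil => simp
      | cons e l' =>
        exfalso
        rw [hs] at hnd
        have hd : d ∈ xs := (PySem.Set.mem_ofList xs d).1 (by rw [hs]; simp)
        have he : e ∈ xs := (PySem.Set.mem_ofList xs e).1 (by rw [hs]; simp)
        have : d = e := h d hd e he
        subst this
        simp at hnd

-- list surgery for towers[-1] = v
theorem pvSetD_neg_one {α : Type} (l : List α) (x v : α) :
    PySem.List.pySetD (l ++ [x]) (-1) v = l ++ [v] := by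
  simp [PySem.List.pySetD, PySem.List.pySet?, PySem.List.pyIdx?]

-- [xs[i] for i in range(m)] is take m
theorem pvRangeMapGetD {α : Type} (xs : List α) (d : α) (m : Nat) (hm : m ≤ xs.length) :
    (PySem.List.pyRange 0 (m : Int) 1).map (fun i => PySem.List.pyGetD xs i d) = xs.take m := by
  rw [PySem.List.pyRange_one]
  simp only [Int.sub_zero, Int.toNat_natCast, List.map_map]
  apply List.ext_getElem
  · simp [Nat.min_eq_left hm]
  · intro i h1 h2
    have hi : i < xs.length := by simp at h2; omega
    simp [PySem.List.pyGetD_natCast, List.getElem?_eq_getElem hi]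

-- the generator in A's all-equal check is map fst
theorem pvAllEqMap (ts : List (Int × Int)) :
    (PySem.List.pyRange 0 ((ts.length : Nat) : Int) 1).map
        (fun i => (PySem.List.pyGetD ts i ((0 : Int), (0 : Int))).1)
      = ts.map (·.1) := by
  have h := pvRangeMapGetD ts ((0 : Int), (0 : Int)) ts.length (le_refl _)
  calc (PySem.List.pyRange 0 ((ts.length : Nat) : Int) 1).map
          (fun i => (PySem.List.pyGetD ts i ((0 : Int), (0 : Int))).1)
      = ((PySem.List.pyRange 0 ((ts.length : Nat) : Int) 1).map
          (fun i => PySem.List.pyGetD ts i ((0 : Int), (0 : Int)))).map (·.1) := by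
        rw [List.map_map]; rfl
    _ = ts.map (·.1) := by rw [h, List.take_length]

-- A's all-equal check, on a sorted non-empty list with n = its length, is "ends are equal"
theorem pvAllEq_iff (t : Int × Int) (rest : List (Int × Int))
    (hs : (t :: rest).Pairwise (fun a b => toLex a ≤ toLex b)) :
    mtiAllEq (((t :: rest).length : Nat) : Int) (t :: rest) = true
      ↔ t.1 = ((t :: rest).getLast (by simp)).1 := by
  unfold mtiAllEq
  rw [pvAllEqMap]
  rw [Nat.beq_eq_true_eq]
  rw [pvSetLenOne _ (by simp)]
  constructor
  · intro h
    exact h t.1 (by simp) ((t :: rest).getLast (by simp)).1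
      (List.mem_map.2 ⟨_, List.getLast_mem _, rfl⟩)
  · intro h a ha b hb
    rcases List.mem_map.1 ha with ⟨ea, hea, rfl⟩
    rcases List.mem_map.1 hb with ⟨eb, heb, rfl⟩
    have h1 := pvHead_le t rest hs ea hea
    have h2 := pvLe_last (t :: rest) (by simp) hs ea hea
    have h3 := pvHead_le t rest hs eb heb
    have h4 := pvLe_last (t :: rest) (by simp) hs eb heb
    omega


-- core step: sorting A's modified list equals B's two ordered inserts
theorem pvStep_eq (t u : Int × Int) (rs : List (Int × Int))
    (hs : (t :: u :: rs).Pairwise (fun a b => toLex a ≤ toLex b)) :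
    PySem.List.sorted
        ((t.1 + 1, t.2) :: ((u :: rs).dropLast ++
          [(((u :: rs).getLast (by simp)).1 - 1, ((u :: rs).getLast (by simp)).2)]))
        (fun p => toLex p)
      = pvInsort (t.1 + 1, t.2)
          (pvInsort (((u :: rs).getLast (by simp)).1 - 1, ((u :: rs).getLast (by simp)).2)
            ((u :: rs).dropLast)) := by
  set lo : Int × Int := (t.1 + 1, t.2) with hlo
  set hi : Int × Int := (((u :: rs).getLast (by simp)).1 - 1, ((u :: rs).getLast (by simp)).2)
    with hhi
  set mid : List (Int × Int) := (u :: rs).dropLast with hmid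
  apply pvSortedUnique
  · -- both sides are permutations of lo :: hi :: mid
    refine (PySem.List.sorted_perm _ _ _).trans ?_
    refine (List.Perm.cons lo (List.perm_append_singleton hi mid)).trans ?_
    exact ((pvInsort_perm lo (pvInsort hi mid)).trans
      (List.Perm.cons lo (pvInsort_perm hi mid))).symm
  · exact PySem.List.sorted_pairwise _ _
  · have hmidp : mid.Pairwise (fun a b => toLex a ≤ toLex b) :=
      List.Pairwise.sublist
        ((List.dropLast_sublist (u :: rs)).trans (List.sublist_cons_self t (u :: rs))) hs
    exact pvInsort_pairwise _ _ (pvInsort_pairwise _ _ hmidp)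



-- A's loop body on a list of length ≥ 2, written as explicit list surgery
theorem pvLoopBody (nn : Int) (fuel : Nat) (t u : Int × Int) (rs ops : List (Int × Int)) :
    mtiLoop nn (fuel + 1) (t :: u :: rs) ops =
      if mtiAllEq nn (PySem.List.sorted
          ((t.1 + 1, t.2) :: ((u :: rs).dropLast ++
            [(((u :: rs).getLast (by simp)).1 - 1, ((u :: rs).getLast (by simp)).2)]))
          (fun p => toLex p))
      then (PySem.List.sorted
          ((t.1 + 1, t.2) :: ((u :: rs).dropLast ++
            [(((u :: rs).getLast (by simp)).1 - 1, ((u :: rs).getLast (by simp)).2)]))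
          (fun p => toLex p),
        ops ++ [(((u :: rs).getLast (by simp)).2, t.2)])
      else mtiLoop nn fuel (PySem.List.sorted
          ((t.1 + 1, t.2) :: ((u :: rs).dropLast ++
            [(((u :: rs).getLast (by simp)).1 - 1, ((u :: rs).getLast (by simp)).2)]))
          (fun p => toLex p))
        (ops ++ [(((u :: rs).getLast (by simp)).2, t.2)]) := by
  show (if (t :: u :: rs) = [] then _ else _) = _
  rw [if_neg (by simp)]
  have h0 : PySem.List.pyGetD (t :: u :: rs) 0 ((0 : Int), (0 : Int)) = t :=
    PySem.List.pyGetD_zero_cons _ _ _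
  have hset0 : PySem.List.pySetD (t :: u :: rs) 0 (t.1 + 1, t.2)
      = (t.1 + 1, t.2) :: u :: rs := by
    rw [PySem.List.pySetD_of_nonneg (i := 0) _ _ (by omega)]
    rfl
  have hd : ((t.1 + 1, t.2) :: u :: rs) = ((t.1 + 1, t.2) :: (u :: rs).dropLast)
      ++ [(u :: rs).getLast (by simp)] := by
    rw [List.cons_append, List.dropLast_append_getLast]
  have hgl : PySem.List.pyGetD ((t.1 + 1, t.2) :: u :: rs) (-1) ((0 : Int), (0 : Int))
      = (u :: rs).getLast (by simp) := by
    rw [hd]; exact PySem.List.pyGetD_neg_one_append_singleton _ _ _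
  have hset1 : PySem.List.pySetD ((t.1 + 1, t.2) :: u :: rs) (-1)
      (((u :: rs).getLast (by simp)).1 - 1, ((u :: rs).getLast (by simp)).2)
      = ((t.1 + 1, t.2) :: (u :: rs).dropLast)
        ++ [(((u :: rs).getLast (by simp)).1 - 1, ((u :: rs).getLast (by simp)).2)] := by
    rw [hd]; exact pvSetD_neg_one _ _ _
  simp only [h0, hset0, hgl, hset1]
  rw [PySem.List.pyGetD_neg_one_append_singleton, List.cons_append,
    PySem.List.pyGetD_zero_cons]

-- B's loop exits immediately when the ends agree
theorem pvAltStop (fuel : Nat) (t : Int × Int) (rest ops : List (Int × Int))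
    (h : t.1 = ((t :: rest).getLast (by simp)).1) :
    mtiAltLoop fuel (t :: rest) ops = (t :: rest, ops) := by
  cases fuel with
  | zero => rfl
  | succ m => simp [mtiAltLoop, h]

-- the two loops agree, and the result stays sorted with the same length
theorem pvLoop_eq (nn : Int) :
    ∀ (fuel : Nat) (t : Int × Int) (rest ops : List (Int × Int)),
    (t :: rest).Pairwise (fun a b => toLex a ≤ toLex b) →
    (fuel = 0 ∨ t.1 ≠ ((t :: rest).getLast (by simp)).1) →
    nn = ((t :: rest).length : Int) →
    mtiLoop nn fuel (t :: rest) ops = mtiAltLoop fuel (t :: rest) ops ∧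
      ∃ (t' : Int × Int) (rest' : List (Int × Int)),
        (mtiAltLoop fuel (t :: rest) ops).1 = t' :: rest' ∧
        (t' :: rest').Pairwise (fun a b => toLex a ≤ toLex b) ∧
        (t' :: rest').length = (t :: rest).length := by
  intro fuel
  induction fuel with
  | zero =>
    intro t rest ops hs _ _
    exact ⟨rfl, t, rest, rfl, hs, rfl⟩
  | succ m ih =>
    intro t rest ops hs hgd hn
    rcases hgd with hgd | hgd
    · exact absurd hgd (by omega)
    cases rest with
    | nil => simp at hgd
    | cons u rs =>
      have hglc : ((t :: u :: rs).getLast (by simp)) = ((u :: rs).getLast (by simp)) :=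
        List.getLast_cons (by simp)
      have hstep := pvStep_eq t u rs hs
      have hb : mtiAltLoop (m + 1) (t :: u :: rs) ops
          = mtiAltLoop m (PySem.List.sorted
              ((t.1 + 1, t.2) :: ((u :: rs).dropLast ++
                [(((u :: rs).getLast (by simp)).1 - 1, ((u :: rs).getLast (by simp)).2)]))
              (fun p => toLex p))
            (ops ++ [(((u :: rs).getLast (by simp)).2, t.2)]) := by
        simp only [mtiAltLoop]
        rw [if_neg (by rw [hglc] at hgd; exact hgd), hglc, hstep]
      have ha := pvLoopBody nn m t u rs ops
      set S := PySem.List.sorted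
          ((t.1 + 1, t.2) :: ((u :: rs).dropLast ++
            [(((u :: rs).getLast (by simp)).1 - 1, ((u :: rs).getLast (by simp)).2)]))
          (fun p => toLex p) with hS
      have hlen : S.length = (t :: u :: rs).length := by
        rw [hS, PySem.List.length_sorted]
        simp [List.length_dropLast]
      have hsorted' : S.Pairwise (fun a b => toLex a ≤ toLex b) := by
        rw [hS]; exact PySem.List.sorted_pairwise _ _
      obtain ⟨t', rest', htw'⟩ : ∃ t' rest', S = t' :: rest' := by
        cases hc : S with
        | nil => rw [hc] at hlen; simp at hlen
        | cons a b => exact ⟨a, b, rfl⟩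
      have hn' : nn = ((t' :: rest').length : Int) := by
        rw [← htw', hlen]; exact hn
      rw [htw'] at hsorted' hlen
      by_cases hae : mtiAllEq nn S = true
      · rw [ha, if_pos hae, hb, htw']
        have hae' : t'.1 = ((t' :: rest').getLast (by simp)).1 := by
          rw [hn', htw'] at hae
          exact (pvAllEq_iff t' rest' hsorted').1 hae
        rw [pvAltStop m t' rest' _ hae']
        exact ⟨rfl, t', rest', rfl, hsorted', hlen⟩
      · rw [ha, if_neg hae, hb, htw']
        have hne' : t'.1 ≠ ((t' :: rest').getLast (by simp)).1 := by
          intro hcontra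
          apply hae
          rw [hn']
          rw [htw']
          exact (pvAllEq_iff t' rest' hsorted').2 hcontra
        rcases ih t' rest' (ops ++ [(((u :: rs).getLast (by simp)).2, t.2)]) hsorted'
            (Or.inr hne') hn' with ⟨heq, t'', rest'', h1, h2, h3⟩
        exact ⟨heq, t'', rest'', h1, h2, by rw [h3, hlen]⟩


-- running max over a sorted list ends at the last element
theorem pvFoldlMaxLast : ∀ (rest : List (Int × Int)) (t : Int × Int),
    (t :: rest).Pairwise (fun a b => toLex a ≤ toLex b) →
    (rest.map (·.1)).foldl max t.1 = ((t :: rest).getLast (by simp)).1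
  | [], t, _ => by simp
  | u :: us, t, h => by
    have h1 := pvHead_le t (u :: us) h u (by simp)
    have htail := (List.pairwise_cons.1 h).2
    rw [List.getLast_cons (by simp : u :: us ≠ [])]
    calc ((u :: us).map (·.1)).foldl max t.1
        = (us.map (·.1)).foldl max (max t.1 u.1) := by simp [List.foldl_cons]
      _ = (us.map (·.1)).foldl max u.1 := by rw [max_eq_right h1]
      _ = ((u :: us).getLast (by simp)).1 := pvFoldlMaxLast us u htail

-- running min over a list that is bounded below by the seed stays at the seed
theorem pvFoldlMinConst : ∀ (l : List Int) (c : Int), (∀ x ∈ l, c ≤ x) → l.foldl min c = c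
  | [], _, _ => rfl
  | x :: xs, c, h => by
    rw [List.foldl_cons, min_eq_left (h x (by simp))]
    exact pvFoldlMinConst xs c (fun y hy => h y (by simp [hy]))

-- "all heights equal" in Pre_/D_ form vs the set-cardinality test
theorem pvConst_iff (heights : List Int) (hne : heights ≠ []) :
    (PySem.Set.ofList heights).length = 1 ↔ ∀ h ∈ heights, h = heights.getD 0 0 := by
  rw [pvSetLenOne heights hne]
  cases heights with
  | nil => exact absurd rfl hne
  | cons h0 hs =>
    constructor
    · intro hp h hh
      exact hp h hh h0 (by simp)
    · intro hp a ha b hb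
      rw [hp a ha, hp b hb]

theorem pvLoopOpsMono (nn : Int) : ∀ (fuel : Nat) (ts ops : List (Int × Int)),
    ops.length ≤ (mtiLoop nn fuel ts ops).2.length := by
  intro fuel
  induction fuel with
  | zero => intro ts ops; exact le_refl _
  | succ m ih =>
    intro ts ops
    simp only [mtiLoop]
    split
    · exact le_refl _
    · split
      · simp
      · exact le_trans (by simp) (ih _ _)

-- with fuel left and a non-empty tower list, A's loop records at least one operation
theorem pvLoopOpsGrow (nn : Int) (m : Nat) (ts ops : List (Int × Int)) (h : ¬ts = []) :
    ops.length + 1 ≤ (mtiLoop nn (m + 1) ts ops).2.length := by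
  simp only [mtiLoop]
  rw [if_neg h]
  split
  · simp
  · exact le_trans (by simp) (pvLoopOpsMono nn m _ _)

-- ===== VERDICT (by name: the statements are the Claim_ definitions above) =====
theorem minimize_tower_instability_spec : Claim_unchanged_minimize_tower_instability := by
  intro n k heights _ hpre hnD
  by_cases hset : (PySem.Set.ofList heights).length = 1
  · simp only [minimize_tower_instability, minimize_tower_instability_alt, if_pos hset]
  · -- heights not constant; Pre_ then forces 1 ≤ n ≤ len heights
    have hne : heights ≠ [] := by
      intro h; subst h
      rcases hpre.2 with h1 | h2
      · have := hpre.1; simp at this; omega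
      · exact h2.1 rfl
    have hn1 : 1 ≤ n := by
      rcases hpre.2 with h1 | h2
      · exact h1
      · exact absurd ((pvConst_iff heights hne).2 h2.2) hset
    have hnlen : n ≤ (heights.length : Int) := hpre.1
    simp only [minimize_tower_instability, minimize_tower_instability_alt, if_neg hset]
    set tws := PySem.List.sorted
        ((PySem.List.pyRange 0 n 1).map (fun i => (PySem.List.pyGetD heights i 0, i + 1)))
        (fun p => toLex p) with htws
    -- towers facts
    have hlen : tws.length = n.toNat := by
      rw [htws, PySem.List.length_sorted, List.length_map, PySem.List.length_pyRange_one]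
      simp
    have hcast : n = ((tws.length : Nat) : Int) := by
      rw [hlen, Int.toNat_of_nonneg (by omega)]
    obtain ⟨t, rest, htr⟩ : ∃ t rest, tws = t :: rest := by
      cases hc : tws with
      | nil => rw [hc] at hlen; simp at hlen; omega
      | cons a b => exact ⟨a, b, rfl⟩
    have hsorted : (t :: rest).Pairwise (fun a b => toLex a ≤ toLex b) := by
      rw [← htr, htws]; exact PySem.List.sorted_pairwise _ _
    -- map fst of the tower list is a permutation of the first n heights
    have hprefix : (tws.map (·.1)).Perm (heights.take n.toNat) := by
      have hperm : tws.Perm ((PySem.List.pyRange 0 n 1).map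
          (fun i => (PySem.List.pyGetD heights i 0, i + 1))) := by
        rw [htws]; exact PySem.List.sorted_perm _ _ _
      have hcastn : n = ((n.toNat : Nat) : Int) := by omega
      have hmapeq : (PySem.List.pyRange 0 n 1).map (fun i => PySem.List.pyGetD heights i 0)
          = heights.take n.toNat := by
        have h2 := pvRangeMapGetD heights 0 n.toNat (by omega)
        rw [← hcastn] at h2
        exact h2
      refine (hperm.map (·.1)).trans ?_
      simp only [List.map_map, Function.comp_def]
      rw [hmapeq]
    -- loop guard
    have hguard : k.toNat = 0 ∨ t.1 ≠ ((t :: rest).getLast (by simp)).1 := by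
      by_cases hk : k ≤ 0
      · left; omega
      · right
        intro hcontra
        apply hnD
        refine ⟨hn1, by omega, ?_, fun hall => hset ((pvConst_iff heights hne).2 hall)⟩
        intro h hh
        -- every tower first component equals t.1
        have hallfst : ∀ x ∈ tws.map (·.1), x = t.1 := by
          intro x hx
          rcases List.mem_map.1 (htr ▸ hx) with ⟨e, he, rfl⟩
          have hlow := pvHead_le t rest hsorted e he
          have hhigh := pvLe_last (t :: rest) (by simp) hsorted e he
          omega
        have hmem : h ∈ tws.map (·.1) := (hprefix.mem_iff).2 (by exact hh)
        have hmem0 : heights.getD 0 0 ∈ tws.map (·.1) := by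
          refine (hprefix.mem_iff).2 ?_
          cases heights with
          | nil => exact absurd rfl hne
          | cons h0 hs =>
            have : n.toNat ≠ 0 := by omega
            cases hm : n.toNat with
            | zero => omega
            | succ m => simp
        rw [hallfst h hmem, hallfst _ hmem0]
    -- run the loops together
    have hloop := pvLoop_eq n k.toNat t rest [] hsorted hguard (by rw [← htr]; exact hcast)
    rcases hloop with ⟨heq, t', rest', hfst, hsorted', hlen'⟩
    rw [htr, heq, hfst]
    -- A's epilogue on the final sorted list
    have hcast' : n = (((t' :: rest').length : Nat) : Int) := by
      rw [hlen', ← htr]; exact hcast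
    have hfhs : (PySem.List.pyRange 0 n 1).map
        (fun i => (PySem.List.pyGetD (t' :: rest') i ((0 : Int), (0 : Int))).1)
        = t'.1 :: rest'.map (·.1) := by
      rw [hcast', pvAllEqMap]; rfl
    rw [hfhs]
    rw [PySem.List.max?_id_cons, PySem.List.min?_id_cons]
    rw [pvFoldlMaxLast rest' t' hsorted']
    rw [pvFoldlMinConst (rest'.map (·.1)) t'.1 (by
      intro x hx
      rcases List.mem_map.1 hx with ⟨e, he, rfl⟩
      exact pvHead_le t' rest' hsorted' e (by simp [he]))]
    rfl



-- A's loop never drops recorded operations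

theorem minimize_tower_instability_changed : Claim_changed_minimize_tower_instability := by
  unfold Claim_changed_minimize_tower_instability; decide

theorem minimize_tower_instability_tight : Claim_exact_minimize_tower_instability := by
  intro n k heights _ hpre hD
  obtain ⟨hn1, hk1, hprefeq, hnall⟩ := hD
  have hnlen : n ≤ (heights.length : Int) := hpre.1
  have hne : heights ≠ [] := by
    intro h; subst h; simp at hnlen; omega
  have hset : ¬(PySem.Set.ofList heights).length = 1 := by
    intro h
    exact hnall ((pvConst_iff heights hne).1 h)
  set tws := PySem.List.sorted
      ((PySem.List.pyRange 0 n 1).map (fun i => (PySem.List.pyGetD heights i 0, i + 1)))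
      (fun p => toLex p) with htws
  have hlen : tws.length = n.toNat := by
    rw [htws, PySem.List.length_sorted, List.length_map, PySem.List.length_pyRange_one]
    simp
  obtain ⟨t, rest, htr⟩ : ∃ t rest, tws = t :: rest := by
    cases hc : tws with
    | nil => rw [hc] at hlen; simp at hlen; omega
    | cons a b => exact ⟨a, b, rfl⟩
  have hsorted : (t :: rest).Pairwise (fun a b => toLex a ≤ toLex b) := by
    rw [← htr, htws]; exact PySem.List.sorted_pairwise _ _
  have hprefix : (tws.map (·.1)).Perm (heights.take n.toNat) := by
    have hperm : tws.Perm ((PySem.List.pyRange 0 n 1).map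
        (fun i => (PySem.List.pyGetD heights i 0, i + 1))) := by
      rw [htws]; exact PySem.List.sorted_perm _ _ _
    have hcastn : n = ((n.toNat : Nat) : Int) := by omega
    have hmapeq : (PySem.List.pyRange 0 n 1).map (fun i => PySem.List.pyGetD heights i 0)
        = heights.take n.toNat := by
      have h2 := pvRangeMapGetD heights 0 n.toNat (by omega)
      rw [← hcastn] at h2
      exact h2
    refine (hperm.map (·.1)).trans ?_
    simp only [List.map_map, Function.comp_def]
    rw [hmapeq]
  -- the first n heights are all equal, so the ends of the sorted tower list agree
  have hends : t.1 = ((t :: rest).getLast (by simp)).1 := by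
    have hc : ∀ x ∈ tws.map (·.1), x = heights.getD 0 0 := by
      intro x hx
      exact hprefeq x (hprefix.mem_iff.1 hx)
    have h1 : t.1 ∈ tws.map (·.1) := by rw [htr]; simp
    have h2 : ((t :: rest).getLast (by simp)).1 ∈ tws.map (·.1) := by
      rw [htr]
      exact List.mem_map.2 ⟨_, List.getLast_mem _, rfl⟩
    rw [hc _ h1, hc _ h2]
  obtain ⟨m, hm⟩ : ∃ m, k.toNat = m + 1 := ⟨k.toNat - 1, by omega⟩
  -- B returns (0, 0, [])
  have hB : minimize_tower_instability_alt n k heights = (0, 0, []) := by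
    simp only [minimize_tower_instability_alt, if_neg hset]
    rw [← htws, htr, hm, pvAltStop (m + 1) t rest [] hends]
    simp [← hends, PySem.List.len_eq]
  -- A records at least one operation
  have hA : 1 ≤ (mtiLoop n k.toNat (t :: rest) []).2.length := by
    rw [hm]
    exact pvLoopOpsGrow n m (t :: rest) [] (by simp)
  intro heq
  rw [hB] at heq
  have h2 := congrArg (fun x : Int × Int × (List (Int × Int)) => x.2.1) heq
  simp only [minimize_tower_instability, if_neg hset] at h2
  rw [← htws, htr] at h2
  simp only [PySem.List.len_eq] at h2
  omega
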